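-- pv_equiv track=rewrite | github.com/cristidragomir97/robocore-cli | managers/environment.py | choose_base_image
-- ===== SOURCE A (Python) =====
-- from typing import Set
--
-- def choose_base_image(dependencies: Set[str], ros_distro: str, registry: str = "") -> str:
--     """
--     Choose a Docker base image based on discovered dependencies and ROS distro.
--     """
--     if registry == "local":
--         prefix = "localhost:5000/"
--     elif registry:
--         prefix = "dragomirxyz/"
--     else:
--         prefix = "dragomirxyz/"
--
--     variant = "base"
--     dependency_map = {
--         "perception": {"cv_bridge", "vision_opencv", "pcl_ros", "image_transport"},
--         "sim": {"gazebo_ros", "gazebo_plugins", "ignition-gazebo"},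
--         "nav": {"navigation2", "nav2_core", "nav2_bringup", "slam_toolbox"},
--     }
--
--     for variant_name, dep_set in dependency_map.items():
--         if dependencies.intersection(dep_set):
--             variant = variant_name
--             break
--
--     return f"{prefix}rcore-{ros_distro}-{variant}"
-- ===== SOURCE B (Python) =====
-- def choose_base_image(dependencies, ros_distro, registry=""):
--     """
--     Choose a Docker base image based on discovered dependencies and ROS distro.
--     """
--     prefix = "localhost:5000/" if registry == "local" else "dragomirxyz/"
--
--     index = {}
--     for pri, (name, toks) in enumerate([
--         ("perception", ["cv_bridge", "vision_opencv", "pcl_ros", "image_transport"]),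
--         ("sim", ["gazebo_ros", "gazebo_plugins", "ignition-gazebo"]),
--         ("nav", ["navigation2", "nav2_core", "nav2_bringup", "slam_toolbox"]),
--     ]):
--         for t in toks:
--             index[t] = (pri, name)
--
--     best = None
--     for dep in dependencies:
--         hit = index.get(dep)
--         if hit is not None and (best is None or hit[0] < best[0]):
--             best = hit
--
--     variant = best[1] if best is not None else "base"
--     return f"{prefix}rcore-{ros_distro}-{variant}"
-- ===== Notes on version B (the rewrite author's own statement) =====
-- stated objective: alternative
-- what changed: Replaces the category-by-category loop with set intersections by a precomputed reverse index token->(priority,variant) and a single pass over the dependencies keeping the lowest-priority hit; the three-way prefix branch collapses to one conditional.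
import Mathlib
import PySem

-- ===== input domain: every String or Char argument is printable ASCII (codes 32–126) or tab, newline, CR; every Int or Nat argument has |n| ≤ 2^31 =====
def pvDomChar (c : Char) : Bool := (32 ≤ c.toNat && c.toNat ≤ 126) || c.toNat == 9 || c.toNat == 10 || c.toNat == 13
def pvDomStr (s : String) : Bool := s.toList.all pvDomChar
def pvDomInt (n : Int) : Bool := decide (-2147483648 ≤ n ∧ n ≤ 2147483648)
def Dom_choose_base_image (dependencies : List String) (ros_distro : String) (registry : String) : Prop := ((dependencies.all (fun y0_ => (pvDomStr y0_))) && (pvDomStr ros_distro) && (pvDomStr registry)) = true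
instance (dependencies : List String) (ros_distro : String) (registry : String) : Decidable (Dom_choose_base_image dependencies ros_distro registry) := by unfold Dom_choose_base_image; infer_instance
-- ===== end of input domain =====

-- B replaces A's category loop with set intersections by a reverse token index and a
-- single min-priority pass over the dependencies (alternative decomposition, same cost class).

-- ===== PORT A =====
-- the three dependency sets of A's dependency_map (Python set literals, distinct elements)
def pvP : List String := ["cv_bridge", "vision_opencv", "pcl_ros", "image_transport"]
def pvS : List String := ["gazebo_ros", "gazebo_plugins", "ignition-gazebo"]
def pvN : List String := ["navigation2", "nav2_core", "nav2_bringup", "slam_toolbox"]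

-- the for-loop over dependency_map.items() with `break`; `dependencies.intersection(dep_set)`
-- is truthy iff some dependency is in dep_set
def cbiLoop (dependencies : List String) : List (String × List String) → String
  | [] => "base"
  | (variant_name, dep_set) :: rest =>
    if dependencies.any (fun d => dep_set.contains d) then variant_name
    else cbiLoop dependencies rest

def choose_base_image (dependencies : List String) (ros_distro : String) (registry : String) : String :=
  let pre := if registry = "local" then "localhost:5000/"
                else if registry ≠ "" then "dragomirxyz/"
                else "dragomirxyz/"
  let variant := cbiLoop dependencies [("perception", pvP), ("sim", pvS), ("nav", pvN)]
  pre ++ "rcore-" ++ ros_distro ++ "-" ++ variant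

-- ===== PORT B =====
-- the reverse index built by the nested enumerate loop of Source B
def cbiIndex : PySem.Dict String (Int × String) :=
  (PySem.List.enumerate [("perception", pvP), ("sim", pvS), ("nav", pvN)]).foldl
    (fun d pe => pe.2.2.foldl (fun d t => d.insert t (pe.1, pe.2.1)) d) PySem.Dict.empty

-- the body of Source B's `for dep in dependencies` loop
def cbiStep (best : Option (Int × String)) (dep : String) : Option (Int × String) :=
  match cbiIndex.get? dep with
  | none => best
  | some hit =>
    match best with
    | none => some hit
    | some b => if hit.1 < b.1 then some hit else best

def choose_base_image_alt (dependencies : List String) (ros_distro : String) (registry : String) : String :=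
  let pre := if registry = "local" then "localhost:5000/" else "dragomirxyz/"
  let best := dependencies.foldl cbiStep none
  let variant := match best with | some b => b.2 | none => "base"
  pre ++ "rcore-" ++ ros_distro ++ "-" ++ variant

-- ===== PRECONDITION & SPEC =====
def Spec_choose_base_image (dependencies : List String) (ros_distro : String) (registry : String) (out : String) : Prop := out = choose_base_image_alt dependencies ros_distro registry
instance (dependencies : List String) (ros_distro : String) (registry : String) (out : String) : Decidable (Spec_choose_base_image dependencies ros_distro registry out) := by unfold Spec_choose_base_image; infer_instance

-- ===== CLAIM (what is proved, stated in full; the proofs are below) =====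
def Claim_equal_choose_base_image : Prop := ∀ (dependencies : List String) (ros_distro : String) (registry : String), Dom_choose_base_image dependencies ros_distro registry → Spec_choose_base_image dependencies ros_distro registry (choose_base_image dependencies ros_distro registry)

-- ===== LEMMAS AND PROOFS =====

-- variant name determined by a priority
def pvNameOf (k : Int) : String := if k = 0 then "perception" else if k = 1 then "sim" else "nav"

-- priority of a single token
def pvLookPri (d : String) : Option Int :=
  if pvP.contains d then some 0 else if pvS.contains d then some 1
  else if pvN.contains d then some 2 else none

-- min on optional priorities
def pvOmin : Option Int → Option Int → Option Int
  | none, y => y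
  | some a, none => some a
  | some a, some b => some (min a b)

-- the priority A's first-match loop effectively selects
def pvAMin (deps : List String) : Option Int :=
  if deps.any (fun d => pvP.contains d) then some 0
  else if deps.any (fun d => pvS.contains d) then some 1
  else if deps.any (fun d => pvN.contains d) then some 2 else none

set_option maxHeartbeats 2000000 in
lemma cbiIndex_get? (d : String) :
    cbiIndex.get? d = (pvLookPri d).map (fun k => (k, pvNameOf k)) := by
  have h : cbiIndex = PySem.Dict.mk
      [("cv_bridge", (0, "perception")), ("vision_opencv", (0, "perception")),
       ("pcl_ros", (0, "perception")), ("image_transport", (0, "perception")),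
       ("gazebo_ros", (1, "sim")), ("gazebo_plugins", (1, "sim")),
       ("ignition-gazebo", (1, "sim")),
       ("navigation2", (2, "nav")), ("nav2_core", (2, "nav")),
       ("nav2_bringup", (2, "nav")), ("slam_toolbox", (2, "nav"))] := by decide
  rw [h]
  by_cases e1 : d = "cv_bridge"; · subst e1; rfl
  by_cases e2 : d = "vision_opencv"; · subst e2; rfl
  by_cases e3 : d = "pcl_ros"; · subst e3; rfl
  by_cases e4 : d = "image_transport"; · subst e4; rfl
  by_cases e5 : d = "gazebo_ros"; · subst e5; rfl
  by_cases e6 : d = "gazebo_plugins"; · subst e6; rfl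
  by_cases e7 : d = "ignition-gazebo"; · subst e7; rfl
  by_cases e8 : d = "navigation2"; · subst e8; rfl
  by_cases e9 : d = "nav2_core"; · subst e9; rfl
  by_cases e10 : d = "nav2_bringup"; · subst e10; rfl
  by_cases e11 : d = "slam_toolbox"; · subst e11; rfl
  simp [PySem.Dict.get?_mk_cons, pvLookPri, pvNameOf, pvP, pvS, pvN,
    e1, e2, e3, e4, e5, e6, e7, e8, e9, e10, e11,
    Ne.symm e1, Ne.symm e2, Ne.symm e3, Ne.symm e4, Ne.symm e5, Ne.symm e6,
    Ne.symm e7, Ne.symm e8, Ne.symm e9, Ne.symm e10, Ne.symm e11]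
  rfl

lemma pvOmin_none_right (p : Option Int) : pvOmin p none = p := by cases p <;> rfl

lemma pvOmin_assoc (a b c : Option Int) : pvOmin (pvOmin a b) c = pvOmin a (pvOmin b c) := by
  cases a <;> cases b <;> cases c <;> simp [pvOmin, min_assoc]

lemma cbiStep_pairOf (p : Option Int) (d : String) :
    cbiStep ((p).map (fun k => (k, pvNameOf k))) d
      = (pvOmin p (pvLookPri d)).map (fun k => (k, pvNameOf k)) := by
  unfold cbiStep
  rw [cbiIndex_get?]
  cases hl : pvLookPri d <;> cases p <;>
    simp [pvOmin]
  rename_i k m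
  by_cases h : k < m
  · rw [if_pos h]
    have hmin : min m k = k := by omega
    simp [hmin]
  · rw [if_neg h]
    have hmin : min m k = m := by omega
    simp [hmin]

lemma pvAMin_cons (d : String) (deps : List String) :
    pvAMin (d :: deps) = pvOmin (pvLookPri d) (pvAMin deps) := by
  unfold pvAMin pvLookPri
  simp only [List.any_cons, Bool.or_eq_true]
  split_ifs <;> (try simp_all [pvOmin]) <;> tauto

lemma foldl_cbiStep (deps : List String) :
    ∀ p : Option Int,
      deps.foldl cbiStep ((p).map (fun k => (k, pvNameOf k)))
        = (pvOmin p (pvAMin deps)).map (fun k => (k, pvNameOf k)) := by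
  induction deps with
  | nil => intro p; simp [pvAMin, pvOmin_none_right]
  | cons d deps ih =>
    intro p
    rw [List.foldl_cons, cbiStep_pairOf, ih, pvAMin_cons, pvOmin_assoc]

lemma cbiLoop_eq (deps : List String) :
    cbiLoop deps [("perception", pvP), ("sim", pvS), ("nav", pvN)]
      = (match pvAMin deps with | some k => pvNameOf k | none => "base") := by
  simp only [cbiLoop, pvAMin]
  split_ifs <;> rfl

-- ===== VERDICT (by name: the statement is the Claim_ definition above) =====
theorem choose_base_image_spec : Claim_equal_choose_base_image := by
  intro deps ros reg _
  unfold Spec_choose_base_image choose_base_image choose_base_image_alt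
  have hb : deps.foldl cbiStep none
      = (pvAMin deps).map (fun k => (k, pvNameOf k)) := by
    have := foldl_cbiStep deps none
    simpa [pvOmin] using this
  rw [cbiLoop_eq, hb]
  cases pvAMin deps <;> split_ifs <;> rfl
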